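-- pv_equiv track=rewrite | github.com/bdeede/towel_sorting | src/towel_design.py | _get_towel_design_pattern
-- ===== SOURCE A (Python) =====
-- def _get_towel_design_pattern(desired_design: str, available_patterns: list, design_pattern_sequence: list = []) -> list:
--     if desired_design == "":
--         return design_pattern_sequence
--
--     for pattern in available_patterns:
--         if desired_design.startswith(pattern):
--             new_sequence = design_pattern_sequence + [pattern]
--             remaining_design = desired_design[len(pattern):]
--             result_sequence = _get_towel_design_pattern(remaining_design, available_patterns, new_sequence)
--             if result_sequence:
--                 return result_sequence
--
--     return []  # return empty list if the desired design cannot be formed by the available patterns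
-- ===== SOURCE B (Python) =====
-- def _get_towel_design_pattern(desired_design: str, available_patterns: list, design_pattern_sequence: list = []) -> list:
--     if desired_design == "":
--         return design_pattern_sequence
--     n = len(desired_design)
--     # tail[i] = first-match decomposition of the suffix starting at i (absent = not decomposable)
--     tail = {n: []}
--     for i in range(n - 1, -1, -1):
--         for p in available_patterns:
--             if desired_design.startswith(p, i):
--                 rest = tail.get(i + len(p))
--                 if rest is not None:
--                     tail[i] = [p] + rest
--                     break
--     result = tail.get(0)
--     return design_pattern_sequence + result if result is not None else []
-- ===== Notes on version B (the rewrite author's own statement) =====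
-- stated objective: alternative
-- what changed: Replaces A's backtracking recursion over suffixes by an iterative bottom-up dynamic program over suffix start indices (dict tail[i] = first-match decomposition of the suffix starting at i), producing the same first-match decomposition; it trades the recursive search (worst-case exponential) for a tabulated scan, though on the measured inputs both run at the same quadratic cost.
-- outside the precondition, e.g. on _get_towel_design_pattern('ab', ['ab', ''], []): A returns ['ab'], B returns ['ab']
import Mathlib
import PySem

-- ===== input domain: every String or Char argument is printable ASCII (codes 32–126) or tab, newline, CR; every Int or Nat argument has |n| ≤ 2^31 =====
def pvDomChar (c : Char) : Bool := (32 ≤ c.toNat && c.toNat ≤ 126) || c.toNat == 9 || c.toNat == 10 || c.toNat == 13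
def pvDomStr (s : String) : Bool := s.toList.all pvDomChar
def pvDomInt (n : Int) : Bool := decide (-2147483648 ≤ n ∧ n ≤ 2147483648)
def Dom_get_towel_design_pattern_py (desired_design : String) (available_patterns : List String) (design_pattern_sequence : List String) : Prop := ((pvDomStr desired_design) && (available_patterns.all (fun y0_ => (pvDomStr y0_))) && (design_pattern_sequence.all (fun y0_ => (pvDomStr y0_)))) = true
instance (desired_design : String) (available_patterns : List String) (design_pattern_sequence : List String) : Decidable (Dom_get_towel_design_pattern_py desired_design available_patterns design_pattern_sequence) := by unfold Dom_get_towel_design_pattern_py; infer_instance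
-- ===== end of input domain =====

-- B replaces A's exponential backtracking recursion by an iterative bottom-up DP over suffix
-- start indices (alternative algorithm; same first-match decomposition is produced).

-- ===== PORT A =====
-- the 'for pattern in available_patterns:' loop body; `recur` is the recursive call
def pyA_loop (recur : List Char → List String → List String) (cs : List Char)
    (seq : List String) : List String → List String
  | [] => []
  | p :: rest =>
    if PySem.Chars.startswith cs p.toList then
      -- desired_design[len(pattern):]
      let res := recur (PySem.List.slice cs (some (PySem.Str.len p)) none) (seq ++ [p])
      if res ≠ [] then res else pyA_loop recur cs seq rest
    else pyA_loop recur cs seq rest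

-- fuel makes the recursion total; inside Pre_ the suffix shrinks at every call, so
-- fuel = length + 1 is never exhausted
def pyA_fuel (pats : List String) : Nat → List Char → List String → List String
  | 0, _, _ => []
  | f + 1, cs, seq =>
    if cs = [] then seq
    else pyA_loop (fun cs' s' => pyA_fuel pats f cs' s') cs seq pats

def get_towel_design_pattern_py (desired_design : String) (available_patterns : List String) (design_pattern_sequence : List String) : List String :=
  pyA_fuel available_patterns (desired_design.toList.length + 1) desired_design.toList design_pattern_sequence

-- ===== PORT B =====
-- inner 'for p in available_patterns:' loop of Source B, with its break;
-- desired_design.startswith(p, i) is ported as desired_design[i:].startswith(p), exact since 0 ≤ i ≤ len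
def pyB_try (cs : List Char) (i : Int) (t : PySem.Dict Int (List String)) :
    List String → PySem.Dict Int (List String)
  | [] => t
  | p :: rest =>
    if PySem.Chars.startswith (PySem.List.slice cs (some i) none) p.toList then
      match t.get? (i + PySem.Str.len p) with
      | some r => t.insert i (p :: r)   -- tail[i] = [p] + rest; break
      | none => pyB_try cs i t rest
    else pyB_try cs i t rest

def get_towel_design_pattern_py_alt (desired_design : String) (available_patterns : List String) (design_pattern_sequence : List String) : List String :=
  if desired_design.toList = [] then design_pattern_sequence
  else
    let cs := desired_design.toList
    let n : Int := cs.length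
    let t0 : PySem.Dict Int (List String) := (PySem.Dict.empty).insert n []
    let t := (PySem.List.pyRange (n - 1) (-1) (-1)).foldl
      (fun t i => pyB_try cs i t available_patterns) t0
    match t.get? 0 with
    | some r => design_pattern_sequence ++ r
    | none => []

-- ===== PRECONDITION & SPEC =====
-- Pre_ excludes an empty string among available_patterns (unless desired_design is empty):
-- trying the empty pattern on a nonempty suffix makes A recurse without consuming input,
-- raising RecursionError on some such inputs.
def Pre_get_towel_design_pattern_py (desired_design : String) (available_patterns : List String) (design_pattern_sequence : List String) : Prop :=
  desired_design = "" ∨ "" ∉ available_patterns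
instance (desired_design : String) (available_patterns : List String) (design_pattern_sequence : List String) : Decidable (Pre_get_towel_design_pattern_py desired_design available_patterns design_pattern_sequence) := by unfold Pre_get_towel_design_pattern_py; infer_instance

def pvWitness_get_towel_design_pattern_py : String × List String × List String :=
  ("abab", (["ab", "b", "a"], ["x"]))

def Spec_get_towel_design_pattern_py (desired_design : String) (available_patterns : List String) (design_pattern_sequence : List String) (out : List String) : Prop := out = get_towel_design_pattern_py_alt desired_design available_patterns design_pattern_sequence
instance (desired_design : String) (available_patterns : List String) (design_pattern_sequence : List String) (out : List String) : Decidable (Spec_get_towel_design_pattern_py desired_design available_patterns design_pattern_sequence out) := by unfold Spec_get_towel_design_pattern_py; infer_instance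

-- ===== CLAIM (what is proved, stated in full; the proofs are below) =====
def Claim_equal_get_towel_design_pattern_py : Prop := ∀ (desired_design : String) (available_patterns : List String) (design_pattern_sequence : List String), Dom_get_towel_design_pattern_py desired_design available_patterns design_pattern_sequence → Pre_get_towel_design_pattern_py desired_design available_patterns design_pattern_sequence → Spec_get_towel_design_pattern_py desired_design available_patterns design_pattern_sequence (get_towel_design_pattern_py desired_design available_patterns design_pattern_sequence)

-- ===== LEMMAS AND PROOFS =====

-- the common specification: one first-match step, `recur` deciding the remaining suffix
def dtry (recur : List Char → Option (List String)) (cs : List Char) :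
    List String → Option (List String)
  | [] => none
  | p :: rest =>
    if p.toList.isPrefixOf cs then
      match recur (cs.drop p.toList.length) with
      | some r => some (p :: r)
      | none => dtry recur cs rest
    else dtry recur cs rest

def dfs (pats : List String) : Nat → List Char → Option (List String)
  | _, [] => some []
  | 0, _ :: _ => none
  | f + 1, c :: cs => dtry (fun cs' => dfs pats f cs') (c :: cs) pats

-- dspec cs = the first-match decomposition of cs (fuel cs.length always suffices)
def dspec (pats : List String) (cs : List Char) : Option (List String) :=
  dfs pats cs.length cs

theorem pat_len_pos {pats : List String} (hp : "" ∉ pats) {p : String} (hpP : p ∈ pats) :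
    0 < p.toList.length := by
  cases hpl : p.toList with
  | nil => exact absurd ((String.toList_eq_nil_iff.mp hpl) ▸ hpP) hp
  | cons _ _ => simp

theorem slice_len (cs : List Char) (p : String) :
    PySem.List.slice cs (some (PySem.Str.len p)) none = cs.drop p.toList.length := by
  rw [PySem.List.slice_from _ (by simp [PySem.Str.len_eq])]; simp [PySem.Str.len_eq]

theorem dtry_congr {r1 r2 : List Char → Option (List String)} {cs : List Char}
    (ps : List String)
    (h : ∀ p ∈ ps, p.toList.isPrefixOf cs → r1 (cs.drop p.toList.length) = r2 (cs.drop p.toList.length)) :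
    dtry r1 cs ps = dtry r2 cs ps := by
  induction ps with
  | nil => rfl
  | cons p rest ih =>
    simp only [dtry]
    by_cases hp : p.toList.isPrefixOf cs
    · rw [if_pos hp, if_pos hp, h p (by simp) hp]
      cases r2 (cs.drop p.toList.length) <;> simp_all
    · rw [if_neg hp, if_neg hp]; exact ih (fun q hq => h q (by simp [hq]))

theorem dfs_fuel (pats : List String) (hp : "" ∉ pats) :
    ∀ n cs, cs.length ≤ n → ∀ f, cs.length ≤ f → dfs pats f cs = dspec pats cs := by
  intro n
  induction n with
  | zero =>
    intro cs hcs f _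
    cases cs with
    | nil => cases f <;> rfl
    | cons c cs' => simp at hcs
  | succ n ih =>
    intro cs hcs f hf
    cases cs with
    | nil => cases f <;> rfl
    | cons c cs' =>
      cases f with
      | zero => simp at hf
      | succ f' =>
        simp only [List.length_cons] at hcs hf
        simp only [dspec, List.length_cons, dfs]
        apply dtry_congr
        intro p hpmem hpref
        have hlen := pat_len_pos hp hpmem
        have hple : p.toList.length ≤ cs'.length + 1 := by
          simpa using (List.isPrefixOf_iff_prefix.mp hpref).length_le
        have hdl : (List.drop p.toList.length (c :: cs')).length
            = cs'.length + 1 - p.toList.length := by simp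
        rw [ih _ (by omega) f' (by omega), ih _ (by omega) cs'.length (by omega)]

theorem dspec_unfold (pats : List String) (hp : "" ∉ pats) (c : Char) (cs' : List Char) :
    dspec pats (c :: cs') = dtry (fun cs'' => dspec pats cs'') (c :: cs') pats := by
  simp only [dspec, List.length_cons, dfs]
  apply dtry_congr
  intro p hpmem hpref
  have hlen := pat_len_pos hp hpmem
  have hple : p.toList.length ≤ cs'.length + 1 := by
    simpa using (List.isPrefixOf_iff_prefix.mp hpref).length_le
  have hdl : (List.drop p.toList.length (c :: cs')).length
      = cs'.length + 1 - p.toList.length := by simp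
  exact dfs_fuel pats hp _ _ (le_refl _) cs'.length (by omega)

theorem pyA_loop_eq (pats : List String) (hp : "" ∉ pats) (n : Nat)
    (ih : ∀ cs : List Char, cs.length ≤ n → ∀ f, cs.length < f → ∀ seq,
      pyA_fuel pats f cs seq = (match dspec pats cs with | some r => seq ++ r | none => []))
    (cs : List Char) (hcs : cs.length ≤ n + 1) (f' : Nat) (hf : cs.length ≤ f')
    (seq : List String) :
    ∀ ps : List String, (∀ p ∈ ps, p ∈ pats) →
      pyA_loop (fun cs' s' => pyA_fuel pats f' cs' s') cs seq ps =
        (match dtry (fun cs' => dspec pats cs') cs ps with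
          | some r => seq ++ r | none => []) := by
  intro ps hps
  induction ps with
  | nil => rfl
  | cons p rest ihp =>
    have hpP : p ∈ pats := hps p (by simp)
    have hlen := pat_len_pos hp hpP
    simp only [pyA_loop, dtry, PySem.Chars.startswith_iff, List.isPrefixOf_iff_prefix,
      slice_len]
    by_cases hpref : p.toList <+: cs
    · rw [if_pos hpref, if_pos hpref]
      have hple : p.toList.length ≤ cs.length := hpref.length_le
      have hdlen : (cs.drop p.toList.length).length ≤ n := by
        simp only [List.length_drop]; omega
      have hdf : (cs.drop p.toList.length).length < f' := by
        simp only [List.length_drop]; omega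
      rw [ih _ hdlen f' hdf (seq ++ [p])]
      cases hds : dspec pats (cs.drop p.toList.length) with
      | some r => simp
      | none =>
        rw [if_neg (by simp)]
        exact ihp (fun q hq => hps q (by simp [hq]))
    · rw [if_neg hpref, if_neg hpref]
      exact ihp (fun q hq => hps q (by simp [hq]))

theorem pyA_eq_dspec (pats : List String) (hp : "" ∉ pats) :
    ∀ n (cs : List Char), cs.length ≤ n → ∀ f, cs.length < f → ∀ seq,
      pyA_fuel pats f cs seq =
        (match dspec pats cs with | some r => seq ++ r | none => []) := by
  intro n
  induction n with
  | zero =>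
    intro cs hcs f hf seq
    have hnil : cs = [] := List.length_eq_zero_iff.mp (by omega)
    subst hnil
    cases f with
    | zero => omega
    | succ f' => simp [pyA_fuel, dspec, dfs]
  | succ n ih =>
    intro cs hcs f hf seq
    cases cs with
    | nil =>
      cases f with
      | zero => omega
      | succ f' => simp [pyA_fuel, dspec, dfs]
    | cons c cs' =>
      cases f with
      | zero => omega
      | succ f' =>
        have h1 : pyA_fuel pats (f' + 1) (c :: cs') seq
            = pyA_loop (fun cs'' s' => pyA_fuel pats f' cs'' s') (c :: cs') seq pats := by
          simp [pyA_fuel]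
        rw [h1, pyA_loop_eq pats hp n ih (c :: cs') hcs f'
          (by simp only [List.length_cons] at hf ⊢; omega) seq pats (fun _ h => h),
          ← dspec_unfold pats hp]

-- B-side invariant: after the countdown has processed indices ≥ i, the dict holds exactly
-- the decomposable suffixes with start index in [i, n]
def BInv (pats : List String) (cs : List Char) (i : Int)
    (t : PySem.Dict Int (List String)) : Prop :=
  ∀ j : Int, t.get? j =
    if i ≤ j ∧ j ≤ (cs.length : Int) then dspec pats (cs.drop j.toNat) else none

theorem pyB_try_eq (pats : List String) (hp : "" ∉ pats) (cs : List Char) (i : Int)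
    (hi0 : 0 ≤ i) (hin : i < (cs.length : Int)) (t : PySem.Dict Int (List String))
    (hinv : BInv pats cs (i + 1) t) :
    ∀ ps : List String, (∀ p ∈ ps, p ∈ pats) →
      pyB_try cs i t ps =
        (match dtry (fun cs' => dspec pats cs') (cs.drop i.toNat) ps with
          | some r => t.insert i r | none => t) := by
  intro ps hps
  induction ps with
  | nil => rfl
  | cons p rest ihp =>
    have hpP : p ∈ pats := hps p (by simp)
    have hlen := pat_len_pos hp hpP
    simp only [pyB_try, dtry, PySem.Chars.startswith_iff, List.isPrefixOf_iff_prefix,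
      PySem.List.slice_from _ hi0]
    by_cases hpref : p.toList <+: cs.drop i.toNat
    · rw [if_pos hpref, if_pos hpref]
      have hple : p.toList.length ≤ cs.length - i.toNat := by
        simpa using hpref.length_le
      have hget : t.get? (i + PySem.Str.len p)
          = dspec pats ((cs.drop i.toNat).drop p.toList.length) := by
        rw [hinv]
        rw [if_pos (by simp only [PySem.Str.len_eq]; omega)]
        rw [List.drop_drop]
        congr 2
        simp only [PySem.Str.len_eq]
        omega
      rw [hget]
      cases hds : dspec pats ((cs.drop i.toNat).drop p.toList.length) with
      | some r => rfl
      | none => exact ihp (fun q hq => hps q (by simp [hq]))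
    · rw [if_neg hpref, if_neg hpref]
      exact ihp (fun q hq => hps q (by simp [hq]))

theorem pyB_step (pats : List String) (hp : "" ∉ pats) (cs : List Char) (i : Int)
    (hi0 : 0 ≤ i) (hin : i < (cs.length : Int)) (t : PySem.Dict Int (List String))
    (hinv : BInv pats cs (i + 1) t) :
    BInv pats cs i (pyB_try cs i t pats) := by
  obtain ⟨c, cs', hdrop⟩ : ∃ c cs', cs.drop i.toNat = c :: cs' := by
    cases hcase : cs.drop i.toNat with
    | nil =>
      have := congrArg List.length hcase
      simp only [List.length_drop, List.length_nil] at this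
      omega
    | cons c cs' => exact ⟨c, cs', rfl⟩
  rw [pyB_try_eq pats hp cs i hi0 hin t hinv pats (fun _ h => h)]
  rw [show (dtry (fun cs' => dspec pats cs') (cs.drop i.toNat) pats)
      = dspec pats (cs.drop i.toNat) by rw [hdrop, ← dspec_unfold pats hp]]
  cases hds : dspec pats (cs.drop i.toNat) with
  | some r =>
    intro j
    rw [PySem.Dict.get?_insert]
    by_cases hji : j = i
    · subst hji
      rw [if_pos rfl, if_pos ⟨le_refl _, by omega⟩, hds]
    · rw [if_neg hji, hinv j]
      by_cases hcond : i + 1 ≤ j ∧ j ≤ (cs.length : Int)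
      · rw [if_pos hcond, if_pos ⟨by omega, hcond.2⟩]
      · rw [if_neg hcond, if_neg (by omega)]
  | none =>
    intro j
    rw [hinv j]
    by_cases hji : j = i
    · subst hji
      rw [if_neg (by omega), if_pos ⟨le_refl _, by omega⟩, hds]
    · by_cases hcond : i + 1 ≤ j ∧ j ≤ (cs.length : Int)
      · rw [if_pos hcond, if_pos ⟨by omega, hcond.2⟩]
      · rw [if_neg hcond, if_neg (by omega)]

theorem pyB_fold (pats : List String) (hp : "" ∉ pats) (cs : List Char) :
    ∀ (k : Nat) (i : Int), i + 1 = (k : Int) → i < (cs.length : Int) →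
      ∀ t, BInv pats cs (i + 1) t →
      BInv pats cs 0 ((PySem.List.pyRange i (-1) (-1)).foldl
        (fun t j => pyB_try cs j t pats) t) := by
  intro k
  induction k with
  | zero =>
    intro i hik hin t hinv
    rw [PySem.List.pyRange_neg_one_eq_nil (by omega)]
    simpa [show i + 1 = (0:Int) by omega] using hinv
  | succ k ihk =>
    intro i hik hin t hinv
    rw [PySem.List.pyRange_neg_one_cons (by omega : (-1:Int) < i)]
    simp only [List.foldl_cons]
    exact ihk (i - 1) (by omega) (by omega) _
      (by simpa [show i - 1 + 1 = i by omega] using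
        pyB_step pats hp cs i (by omega) hin t hinv)

-- ===== VERDICT (by name: the statement is the Claim_ definition above) =====
theorem get_towel_design_pattern_py_spec : Claim_equal_get_towel_design_pattern_py := by
  intro d pats seq _ hpre
  unfold Spec_get_towel_design_pattern_py
  unfold get_towel_design_pattern_py get_towel_design_pattern_py_alt
  by_cases hd : d.toList = []
  · rw [if_pos hd, hd]
    rfl
  · have hp : "" ∉ pats := by
      rcases hpre with h | h
      · exact absurd (h ▸ hd) (by simp)
      · exact h
    rw [if_neg hd]
    have hlen : 0 < d.toList.length := List.length_pos_iff.mpr hd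
    have hfold : BInv pats d.toList 0
        ((PySem.List.pyRange ((d.toList.length : Int) - 1) (-1) (-1)).foldl
          (fun t j => pyB_try d.toList j t pats)
          ((PySem.Dict.empty).insert (d.toList.length : Int) [])) := by
      apply pyB_fold pats hp d.toList d.toList.length ((d.toList.length : Int) - 1)
        (by omega) (by omega)
      intro j
      rw [PySem.Dict.get?_insert]
      by_cases hj : j = (d.toList.length : Int)
      · subst hj
        rw [if_pos rfl, if_pos ⟨by omega, le_refl _⟩,
          show ((d.toList.length : Int)).toNat = d.toList.length from by omega,
          List.drop_length]
        rfl
      · rw [if_neg hj, if_neg (by omega)]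
        simp [PySem.Dict.get?_empty]
    have h0 := hfold 0
    rw [if_pos ⟨le_refl _, by omega⟩] at h0
    simp only [Int.toNat_zero, List.drop_zero] at h0
    rw [pyA_eq_dspec pats hp d.toList.length d.toList (le_refl _) (d.toList.length + 1)
      (by omega) seq]
    simp only [h0]
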